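-- pv_equiv track=rewrite | github.com/Stichting-CROW/ikob | english/ikob/Weightcombis.py | minmaxmatrix3
-- ===== SOURCE A (Python) =====
-- def minmaxmatrix3(matrix1, matrix2, matrix3, minmax="max"):
--     eindmatrix = []
--     for i in range(0, len(matrix1)):
--         eindmatrix.append([])
--         for j in range(0, len(matrix1)):
--             if minmax == "max":
--                 eindmatrix[i].append(max(matrix1[i][j], matrix2[i][j], matrix3[i][j]))
--             else:
--                 eindmatrix[i].append(min(matrix1[i][j], matrix2[i][j], matrix3[i][j]))
--     return eindmatrix
-- ===== SOURCE B (Python) =====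
-- def minmaxmatrix3(matrix1, matrix2, matrix3, minmax="max"):
--     op = max if minmax == "max" else min
--     n = len(matrix1)
--     intermediate = [[op(matrix1[i][j], matrix2[i][j]) for j in range(n)] for i in range(n)]
--     return [[op(intermediate[i][j], matrix3[i][j]) for j in range(n)] for i in range(n)]
-- ===== Notes on version B (the rewrite author's own statement) =====
-- stated objective: alternative
-- what changed: Selects the comparison operator once instead of branching per cell, and replaces the single pass with three-argument max/min by two sequential passes: a maintained intermediate matrix combining matrix1 and matrix2, then a second pass combining it with matrix3.
import Mathlib
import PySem

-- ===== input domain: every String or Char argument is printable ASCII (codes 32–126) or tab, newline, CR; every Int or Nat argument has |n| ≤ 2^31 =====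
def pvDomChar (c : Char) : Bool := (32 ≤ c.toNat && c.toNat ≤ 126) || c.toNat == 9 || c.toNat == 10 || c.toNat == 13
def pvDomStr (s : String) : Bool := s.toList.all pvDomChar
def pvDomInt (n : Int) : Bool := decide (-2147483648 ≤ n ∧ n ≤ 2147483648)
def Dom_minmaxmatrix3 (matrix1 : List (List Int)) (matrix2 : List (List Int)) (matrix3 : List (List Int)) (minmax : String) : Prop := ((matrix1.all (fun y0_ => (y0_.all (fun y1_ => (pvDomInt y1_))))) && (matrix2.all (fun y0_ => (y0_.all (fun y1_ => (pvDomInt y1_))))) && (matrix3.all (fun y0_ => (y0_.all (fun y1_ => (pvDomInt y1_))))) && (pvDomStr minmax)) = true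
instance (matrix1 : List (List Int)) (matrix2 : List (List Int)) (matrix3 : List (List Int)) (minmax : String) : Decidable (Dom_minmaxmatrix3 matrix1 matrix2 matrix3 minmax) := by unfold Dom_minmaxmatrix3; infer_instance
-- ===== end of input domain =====

-- B selects the operator once and makes two pairwise passes with an intermediate
-- matrix instead of A's per-cell branch with a 3-argument max/min (objective: alternative).

-- ===== PORT A =====
-- Literal port of A: nested i,j loops over range(len(matrix1)), branching on
-- minmax at each cell; eindmatrix.append([]) + inner appends become the inner fold.
def minmaxmatrix3 (matrix1 : List (List Int)) (matrix2 : List (List Int)) (matrix3 : List (List Int)) (minmax : String) : List (List Int) :=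
  (PySem.List.pyRange 0 matrix1.length 1).foldl (fun eindmatrix i =>
    eindmatrix ++ [
      (PySem.List.pyRange 0 matrix1.length 1).foldl (fun row j =>
        if minmax == "max" then
          row ++ [max (max (PySem.List.pyGetD (PySem.List.pyGetD matrix1 i []) j 0)
                           (PySem.List.pyGetD (PySem.List.pyGetD matrix2 i []) j 0))
                      (PySem.List.pyGetD (PySem.List.pyGetD matrix3 i []) j 0)]
        else
          row ++ [min (min (PySem.List.pyGetD (PySem.List.pyGetD matrix1 i []) j 0)
                           (PySem.List.pyGetD (PySem.List.pyGetD matrix2 i []) j 0))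
                      (PySem.List.pyGetD (PySem.List.pyGetD matrix3 i []) j 0)]) []]) []

-- ===== PORT B =====
-- Literal port of Source B: op chosen once, comprehension building the intermediate
-- matrix from matrix1/matrix2, then a second comprehension combining it with matrix3.
def minmaxmatrix3_alt (matrix1 : List (List Int)) (matrix2 : List (List Int)) (matrix3 : List (List Int)) (minmax : String) : List (List Int) :=
  let op : Int → Int → Int := if minmax == "max" then max else min
  let n : Int := matrix1.length
  let intermediate : List (List Int) :=
    (PySem.List.pyRange 0 n 1).map (fun i =>
      (PySem.List.pyRange 0 n 1).map (fun j =>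
        op (PySem.List.pyGetD (PySem.List.pyGetD matrix1 i []) j 0)
           (PySem.List.pyGetD (PySem.List.pyGetD matrix2 i []) j 0)))
  (PySem.List.pyRange 0 n 1).map (fun i =>
    (PySem.List.pyRange 0 n 1).map (fun j =>
      op (PySem.List.pyGetD (PySem.List.pyGetD intermediate i []) j 0)
         (PySem.List.pyGetD (PySem.List.pyGetD matrix3 i []) j 0)))

-- ===== PRECONDITION & SPEC =====
-- Pre_ excludes exactly the inputs on which A raises IndexError: matrix2 or matrix3
-- shorter than matrix1, or a used row shorter than len(matrix1).
def Pre_minmaxmatrix3 (matrix1 : List (List Int)) (matrix2 : List (List Int)) (matrix3 : List (List Int)) (minmax : String) : Prop :=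
  matrix1.length ≤ matrix2.length ∧ matrix1.length ≤ matrix3.length ∧
  (∀ r ∈ matrix1, matrix1.length ≤ r.length) ∧
  (∀ r ∈ matrix2.take matrix1.length, matrix1.length ≤ r.length) ∧
  (∀ r ∈ matrix3.take matrix1.length, matrix1.length ≤ r.length)
instance (matrix1 : List (List Int)) (matrix2 : List (List Int)) (matrix3 : List (List Int)) (minmax : String) : Decidable (Pre_minmaxmatrix3 matrix1 matrix2 matrix3 minmax) := by unfold Pre_minmaxmatrix3; infer_instance

def pvWitness_minmaxmatrix3 : List (List Int) × List (List Int) × List (List Int) × String :=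
  ([[1, 2], [3, 4]], [[5, 0], [7, 1]], [[2, 2], [0, 9]], "max")

def Spec_minmaxmatrix3 (matrix1 : List (List Int)) (matrix2 : List (List Int)) (matrix3 : List (List Int)) (minmax : String) (out : List (List Int)) : Prop := out = minmaxmatrix3_alt matrix1 matrix2 matrix3 minmax
instance (matrix1 : List (List Int)) (matrix2 : List (List Int)) (matrix3 : List (List Int)) (minmax : String) (out : List (List Int)) : Decidable (Spec_minmaxmatrix3 matrix1 matrix2 matrix3 minmax out) := by unfold Spec_minmaxmatrix3; infer_instance

-- ===== CLAIM (what is proved, stated in full; the proofs are below) =====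
def Claim_equal_minmaxmatrix3 : Prop := ∀ (matrix1 : List (List Int)) (matrix2 : List (List Int)) (matrix3 : List (List Int)) (minmax : String), Dom_minmaxmatrix3 matrix1 matrix2 matrix3 minmax → Pre_minmaxmatrix3 matrix1 matrix2 matrix3 minmax → Spec_minmaxmatrix3 matrix1 matrix2 matrix3 minmax (minmaxmatrix3 matrix1 matrix2 matrix3 minmax)

-- ===== LEMMAS AND PROOFS =====

-- Both ports agree unconditionally (the totalized indexing primitives coincide);
-- Pre_ only delimits where the Python A returns instead of raising.
theorem minmaxmatrix3_eq_alt (matrix1 matrix2 matrix3 : List (List Int)) (minmax : String) :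
    minmaxmatrix3 matrix1 matrix2 matrix3 minmax = minmaxmatrix3_alt matrix1 matrix2 matrix3 minmax := by
  unfold minmaxmatrix3 minmaxmatrix3_alt
  by_cases h : minmax == "max" <;>
    simp only [h, if_true, Bool.false_eq_true, if_false,
      PySem.List.foldl_append_singleton_eq_map, List.nil_append] <;>
  · apply List.map_congr_left
    intro i hi
    rw [PySem.List.mem_pyRange_one] at hi
    apply List.map_congr_left
    intro j hj
    rw [PySem.List.mem_pyRange_one] at hj
    rw [PySem.List.pyGetD_map_pyRange_of_nonneg _ _ _ _ hi.1 hi.2,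
        PySem.List.pyGetD_map_pyRange_of_nonneg _ _ _ _ hj.1 hj.2]

-- ===== VERDICT (by name: the statement is the Claim_ definition above) =====
theorem minmaxmatrix3_spec : Claim_equal_minmaxmatrix3 := by
  intro m1 m2 m3 mm _ _
  unfold Spec_minmaxmatrix3
  exact minmaxmatrix3_eq_alt m1 m2 m3 mm
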